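-- pv_equiv track=rewrite | github.com/miracletech322/ProtCyberUltraScanner | SearchEngine/AdvancedAuthSessionAnalyzer.py | _extract_security_headers
-- ===== SOURCE A (Python) =====
-- from typing import Optional, List, Dict, Tuple, Union, Any, Set
--
-- def _extract_security_headers(headers: Dict[str, str]) -> Dict[str, str]:
--     """Extract security-related headers."""
--     security_headers = {}
--
--     security_header_keys = [
--         'X-Frame-Options', 'Content-Security-Policy',
--         'X-Content-Type-Options', 'Strict-Transport-Security',
--         'X-XSS-Protection', 'Referrer-Policy',
--         'Feature-Policy', 'Permissions-Policy',
--         'Set-Cookie', 'WWW-Authenticate',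
--     ]
--
--     for key in security_header_keys:
--         if key in headers:
--             security_headers[key] = headers[key]
--
--     return security_headers
-- ===== SOURCE B (Python) =====
-- _HEADER_RANK = {name: i for i, name in enumerate((
--     'X-Frame-Options', 'Content-Security-Policy',
--     'X-Content-Type-Options', 'Strict-Transport-Security',
--     'X-XSS-Protection', 'Referrer-Policy',
--     'Feature-Policy', 'Permissions-Policy',
--     'Set-Cookie', 'WWW-Authenticate',
-- ))}
--
--
-- def _extract_security_headers(headers):
--     """Extract security-related headers."""
--     hits = [(k, v) for k, v in headers.items() if k in _HEADER_RANK]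
--     hits.sort(key=lambda kv: _HEADER_RANK[kv[0]])
--     return dict(hits)
-- ===== Notes on version B (the rewrite author's own statement) =====
-- stated objective: alternative
-- what changed: A probes each of the 10 whitelist keys against the headers dict in whitelist order; B makes a single filtering pass over headers.items() keeping keys found in a precomputed name->rank dict, then sorts the (at most 10) hits by that rank, reproducing A's whitelist output order.
import Mathlib
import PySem

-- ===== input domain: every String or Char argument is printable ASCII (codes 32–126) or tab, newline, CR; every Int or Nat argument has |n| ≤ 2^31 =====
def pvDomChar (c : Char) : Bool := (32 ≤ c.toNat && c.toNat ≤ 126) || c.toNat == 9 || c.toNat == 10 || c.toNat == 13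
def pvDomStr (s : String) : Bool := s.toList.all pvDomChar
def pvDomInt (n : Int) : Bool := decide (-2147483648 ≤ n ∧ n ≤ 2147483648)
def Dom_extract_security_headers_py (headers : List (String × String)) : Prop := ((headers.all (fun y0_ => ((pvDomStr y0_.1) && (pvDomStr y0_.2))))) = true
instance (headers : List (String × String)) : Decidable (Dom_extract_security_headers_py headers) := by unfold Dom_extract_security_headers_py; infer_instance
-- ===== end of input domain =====

-- B rewrites A's whitelist-probing loop as a single filtering pass over the input's items
-- followed by a sort by precomputed whitelist rank (objective: alternative, not faster).
-- The 'headers' parameter is a Python dict, modelled as its insertion-ordered item list;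
-- both ports read it through PySem.Dict.ofList (last value wins on a duplicated key, as in dict()).

-- ===== PORT A =====
-- security_header_keys (the literal list from A)
def pvSecurityHeaderKeys : List String :=
  ["X-Frame-Options", "Content-Security-Policy",
   "X-Content-Type-Options", "Strict-Transport-Security",
   "X-XSS-Protection", "Referrer-Policy",
   "Feature-Policy", "Permissions-Policy",
   "Set-Cookie", "WWW-Authenticate"]

def extract_security_headers_py (headers : List (String × String)) : List (String × String) :=
  let d := PySem.Dict.ofList headers
  -- for key in security_header_keys: if key in headers: security_headers[key] = headers[key]
  -- headers[key] is read as d.getD key "" — exact here, the branch guarantees the key is present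
  (pvSecurityHeaderKeys.foldl
    (fun sh key => if d.contains key then sh.insert key (d.getD key "") else sh)
    PySem.Dict.empty).items

-- ===== PORT B =====
-- _HEADER_RANK = {name: i for i, name in enumerate((…))}
def pvHeaderRank : PySem.Dict String Int :=
  PySem.Dict.ofList
    ((PySem.List.enumerate
      ["X-Frame-Options", "Content-Security-Policy",
       "X-Content-Type-Options", "Strict-Transport-Security",
       "X-XSS-Protection", "Referrer-Policy",
       "Feature-Policy", "Permissions-Policy",
       "Set-Cookie", "WWW-Authenticate"] 0).map (fun p => (p.2, p.1)))

def extract_security_headers_py_alt (headers : List (String × String)) : List (String × String) :=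
  let d := PySem.Dict.ofList headers
  -- hits = [(k, v) for k, v in headers.items() if k in _HEADER_RANK]
  let hits := d.items.filter (fun kv => pvHeaderRank.contains kv.1)
  -- hits.sort(key=lambda kv: _HEADER_RANK[kv[0]]) — the key is present, getD … 0 is exact
  -- return dict(hits)
  (PySem.Dict.ofList
    (PySem.List.sorted hits (fun kv => pvHeaderRank.getD kv.1 0) false)).items

-- ===== PRECONDITION & SPEC =====
def Spec_extract_security_headers_py (headers : List (String × String)) (out : List (String × String)) : Prop := out = extract_security_headers_py_alt headers
instance (headers : List (String × String)) (out : List (String × String)) : Decidable (Spec_extract_security_headers_py headers out) := by unfold Spec_extract_security_headers_py; infer_instance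

-- ===== CLAIM (what is proved, stated in full; the proofs are below) =====
def Claim_equal_extract_security_headers_py : Prop := ∀ (headers : List (String × String)), Dom_extract_security_headers_py headers → Spec_extract_security_headers_py headers (extract_security_headers_py headers)

-- ===== LEMMAS AND PROOFS =====

-- pvHeaderRank's keys are exactly A's whitelist
theorem pvRank_keys : pvHeaderRank.keys = pvSecurityHeaderKeys := by decide

theorem pvRank_contains (k : String) :
    pvHeaderRank.contains k = true ↔ k ∈ pvSecurityHeaderKeys := by
  rw [PySem.Dict.contains_eq_decide_mem_keys, pvRank_keys]
  simp

-- the whitelist is strictly increasing under pvHeaderRank's rank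
theorem pvRank_pairwise :
    pvSecurityHeaderKeys.Pairwise (fun a b => pvHeaderRank.getD a 0 < pvHeaderRank.getD b 0) := by
  decide

theorem pvSecKeys_nodup : pvSecurityHeaderKeys.Nodup := by decide

-- a Dict built from a list whose keys are distinct lists back exactly that list
theorem pvItems_ofList_of_nodup_keys (l : List (String × String))
    (h : (l.map Prod.fst).Nodup) : (PySem.Dict.ofList l).items = l := by
  have := PySem.Dict.items_foldl_insert_fresh (l := l) (k := Prod.fst) (v := Prod.snd)
    (d := PySem.Dict.empty) (by intro a _; simp [PySem.Dict.contains_empty]) h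
  simpa [PySem.Dict.ofList] using this

-- A's fold computes the whitelist filtered by presence, paired with the looked-up values
theorem pvA_eq_filter_map (d : PySem.Dict String String) :
    (pvSecurityHeaderKeys.foldl
      (fun sh key => if d.contains key then sh.insert key (d.getD key "") else sh)
      PySem.Dict.empty).items
    = (pvSecurityHeaderKeys.filter (fun k => d.contains k)).map (fun k => (k, d.getD k "")) := by
  rw [← List.foldl_filter]
  have := PySem.Dict.items_foldl_insert_fresh
    (l := pvSecurityHeaderKeys.filter (fun k => d.contains k))
    (k := fun k => k) (v := fun k => d.getD k "") (d := PySem.Dict.empty)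
    (by intro a _; simp [PySem.Dict.contains_empty])
    (by simpa using pvSecKeys_nodup.filter _)
  simpa using this

-- ===== VERDICT (by name: the statement is the Claim_ definition above) =====
theorem extract_security_headers_py_spec : Claim_equal_extract_security_headers_py := by
  intro headers _
  unfold Spec_extract_security_headers_py
  unfold extract_security_headers_py extract_security_headers_py_alt
  set d := PySem.Dict.ofList headers with hd
  have hknd : d.keys.Nodup := PySem.Dict.nodup_keys_ofList headers
  set R : List (String × String) :=
    (pvSecurityHeaderKeys.filter (fun k => d.contains k)).map (fun k => (k, d.getD k "")) with hR
  have hA : (pvSecurityHeaderKeys.foldl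
      (fun sh key => if d.contains key then sh.insert key (d.getD key "") else sh)
      PySem.Dict.empty).items = R := pvA_eq_filter_map d
  -- R's keys are distinct
  have hRkeys : (R.map Prod.fst).Nodup := by
    rw [hR]
    rw [List.map_map]
    have : (Prod.fst ∘ fun k => (k, d.getD k "")) = fun k => k := rfl
    rw [this, List.map_id']
    exact pvSecKeys_nodup.filter _
  have hRnd : R.Nodup := hRkeys.of_map
  -- the filtered items of d
  set hits := d.items.filter (fun kv => pvHeaderRank.contains kv.1) with hhits
  have hitemsnd : d.items.Nodup := by
    have : (d.items.map Prod.fst).Nodup := hknd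
    exact this.of_map
  have hhitsnd : hits.Nodup := hitemsnd.filter _
  -- same members
  have hmem : ∀ a : String × String, a ∈ R ↔ a ∈ hits := by
    rintro ⟨k, v⟩
    constructor
    · intro h
      rw [hR] at h
      simp only [List.mem_map, List.mem_filter] at h
      obtain ⟨k', ⟨hk'mem, hk'c⟩, hpair⟩ := h
      obtain ⟨rfl, rfl⟩ : k' = k ∧ d.getD k' "" = v := Prod.mk.injEq .. ▸ Prod.mk.inj hpair
      rw [hhits]
      simp only [List.mem_filter]
      refine ⟨?_, by simpa [pvRank_contains] using hk'mem⟩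
      have h1 : (d.get? k').isSome := by
        rw [← PySem.Dict.contains_eq_isSome_get?]; exact hk'c
      obtain ⟨w, hw⟩ := Option.isSome_iff_exists.mp h1
      have := PySem.Dict.mem_items_of_get?_eq_some d hw
      simpa [PySem.Dict.getD_of_get?_eq_some d "" hw] using this
    · intro h
      rw [hhits] at h
      simp only [List.mem_filter] at h
      obtain ⟨hmemItems, hcont⟩ := h
      have hget : d.get? k = some v :=
        PySem.Dict.get?_of_mem_items d hmemItems hknd
      rw [hR]
      simp only [List.mem_map, List.mem_filter]
      refine ⟨k, ⟨(pvRank_contains k).mp hcont, ?_⟩, ?_⟩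
      · rw [PySem.Dict.contains_eq_isSome_get?, hget]; rfl
      · rw [PySem.Dict.getD_of_get?_eq_some d "" hget]
  have hperm : R.Perm hits :=
    (List.perm_ext_iff_of_nodup hRnd hhitsnd).mpr hmem
  -- R is strictly rank-increasing
  have hpw : R.Pairwise (fun p q => pvHeaderRank.getD p.1 0 < pvHeaderRank.getD q.1 0) := by
    rw [hR]
    exact List.Pairwise.map _ (fun a b h => h) (pvRank_pairwise.filter _)
  have hsorted : PySem.List.sorted hits (fun kv => pvHeaderRank.getD kv.1 0) false = R :=
    PySem.List.sorted_eq_of_perm_of_pairwise_lt hits R (fun kv => pvHeaderRank.getD kv.1 0) hperm hpw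
  rw [hA]
  show R = (PySem.Dict.ofList (PySem.List.sorted hits fun kv => pvHeaderRank.getD kv.1 0)).items
  rw [hsorted, pvItems_ofList_of_nodup_keys R hRkeys]
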